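-- pv_equiv track=rewrite | github.com/298AusCycling/team-pursuit-api | iteration.py | get_chunks_from_schedule
-- ===== SOURCE A (Python) =====
-- def get_chunks_from_schedule(switch_schedule, half_lap_completed, peel_location=None, half_lap_dist=125):
--     """
--     Break the race into 'chunks' of half-laps between switches (marked as 1 in switch_schedule).
--     This helps in 4-rider or 3-rider phases to handle segments with constant order.
--     """
--     chunks = []
--     current_chunk = []
--     chunk_start_idx = half_lap_completed - 1  # because half_lap_completed is how many we've finished
--
--     rest_schedule = switch_schedule[chunk_start_idx:]
--     for i, val in enumerate(rest_schedule):
--         current_chunk.append(val)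
--         if val == 1:
--             # We reached a switch
--             chunk_half_laps = len(current_chunk)
--             switch_idx = chunk_start_idx + chunk_half_laps
--
--             # If there's a peel_location and we've gone past it, break
--             if peel_location is not None and switch_idx > peel_location:
--                 break
--
--             distance = 0
--             # Summation of half-laps in this chunk:
--             for j in range(chunk_start_idx, chunk_start_idx + chunk_half_laps):
--                 # If there's a switch at j, maybe you assume a slightly different distance?
--                 # This example code had 125 or 127.
--                 # We'll keep it simple here with 125 each time unless you prefer otherwise.
--                 distance += half_lap_dist
--
--             chunks.append({
--                 'start_idx': chunk_start_idx,
--                 'num_half_laps': chunk_half_laps,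
--                 'distance': distance,
--                 'switch_idx': switch_idx
--             })
--
--             current_chunk = []
--             chunk_start_idx += chunk_half_laps
--
--     # If there's a trailing chunk after final switch
--     if current_chunk:
--         chunk_half_laps = len(current_chunk)
--         distance = chunk_half_laps * half_lap_dist
--         chunks.append({
--             'start_idx': chunk_start_idx,
--             'num_half_laps': chunk_half_laps,
--             'distance': distance,
--             'switch_idx': None
--         })
--
--     return chunks
-- ===== SOURCE B (Python) =====
-- def get_chunks_from_schedule(switch_schedule, half_lap_completed, peel_location=None, half_lap_dist=125):
--     start = half_lap_completed - 1
--     rest = switch_schedule[start:]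
--     switch_positions = [i for i, v in enumerate(rest) if v == 1]
--     chunks = []
--     prev = 0
--     for i in switch_positions:
--         n = i + 1 - prev
--         switch_idx = start + i + 1
--         if peel_location is not None and switch_idx > peel_location:
--             chunks.append({'start_idx': start + prev, 'num_half_laps': n,
--                            'distance': n * half_lap_dist, 'switch_idx': None})
--             return chunks
--         chunks.append({'start_idx': start + prev, 'num_half_laps': n,
--                        'distance': n * half_lap_dist, 'switch_idx': switch_idx})
--         prev = i + 1
--     if prev < len(rest):
--         n = len(rest) - prev
--         chunks.append({'start_idx': start + prev, 'num_half_laps': n,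
--                        'distance': n * half_lap_dist, 'switch_idx': None})
--     return chunks
-- ===== Notes on version B (the rewrite author's own statement) =====
-- stated objective: alternative
-- what changed: B first collects the switch indices of the sliced schedule in one pass, then iterates over those indices maintaining only a running boundary, computing each chunk's length arithmetically and its distance by one multiplication instead of A's element-by-element chunk accumulation and inner range-summation loop.
import Mathlib
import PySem

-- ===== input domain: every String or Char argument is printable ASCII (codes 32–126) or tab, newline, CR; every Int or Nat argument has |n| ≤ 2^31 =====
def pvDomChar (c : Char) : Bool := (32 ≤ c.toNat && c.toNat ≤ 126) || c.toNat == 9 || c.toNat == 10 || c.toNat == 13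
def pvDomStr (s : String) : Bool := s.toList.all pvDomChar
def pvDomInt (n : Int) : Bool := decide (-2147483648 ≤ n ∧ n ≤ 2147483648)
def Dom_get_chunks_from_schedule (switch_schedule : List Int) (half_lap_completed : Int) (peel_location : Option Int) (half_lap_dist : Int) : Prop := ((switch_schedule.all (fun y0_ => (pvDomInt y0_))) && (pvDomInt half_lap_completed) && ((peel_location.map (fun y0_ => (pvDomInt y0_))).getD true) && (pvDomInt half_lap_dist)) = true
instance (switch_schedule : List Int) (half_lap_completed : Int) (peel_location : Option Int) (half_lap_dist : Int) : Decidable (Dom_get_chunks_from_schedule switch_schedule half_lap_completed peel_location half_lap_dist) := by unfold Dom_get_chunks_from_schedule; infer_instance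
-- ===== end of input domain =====

-- B replaces A's element-by-element chunk building (and its inner distance loop) by one pass
-- collecting switch indices followed by arithmetic on those indices; alternative decomposition, not faster.

-- ===== PORT A =====
-- the for-loop of A: state = (chunks, current_chunk, chunk_start_idx); on break it returns the state as-is
def pvALoop (peel : Option Int) (dist : Int) : List Int → List (List (String × Option Int)) → List Int → Int →
    List (List (String × Option Int)) × List Int × Int
  | [], chunks, cur, csi => (chunks, cur, csi)
  | v :: vs, chunks, cur, csi =>
    let cur' := cur ++ [v]
    if v = 1 then
      let n : Int := cur'.length
      let si := csi + n
      if (match peel with | some p => decide (si > p) | none => false) then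
        (chunks, cur', csi)
      else
        let distance := (PySem.List.pyRange csi (csi + n) 1).foldl (fun d _ => d + dist) 0
        pvALoop peel dist vs
          (chunks ++ [[("start_idx", some csi), ("num_half_laps", some n),
                       ("distance", some distance), ("switch_idx", some si)]]) [] (csi + n)
    else
      pvALoop peel dist vs chunks cur' csi

-- the trailing-chunk block after A's loop
def pvAFin (dist : Int) : List (List (String × Option Int)) × List Int × Int → List (List (String × Option Int))
  | (chunks, cur, csi) =>
    if cur.isEmpty then chunks
    else
      let n : Int := cur.length
      chunks ++ [[("start_idx", some csi), ("num_half_laps", some n),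
                  ("distance", some (n * dist)), ("switch_idx", none)]]

def get_chunks_from_schedule (switch_schedule : List Int) (half_lap_completed : Int) (peel_location : Option Int) (half_lap_dist : Int) : List (List (String × Option Int)) :=
  let csi := half_lap_completed - 1
  let rest := PySem.List.slice switch_schedule (some csi) none
  pvAFin half_lap_dist (pvALoop peel_location half_lap_dist rest [] [] csi)

-- ===== PORT B =====
-- [i for i, v in enumerate(rest) if v == 1], with the running index carried explicitly
def pvPosOf (i : Int) : List Int → List Int
  | [] => []
  | v :: vs => if v = 1 then i :: pvPosOf (i + 1) vs else pvPosOf (i + 1) vs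

def pvBLoop (start : Int) (peel : Option Int) (dist : Int) (restLen : Int) :
    List Int → Int → List (List (String × Option Int)) → List (List (String × Option Int))
  | [], prev, acc =>
    if prev < restLen then
      let n := restLen - prev
      acc ++ [[("start_idx", some (start + prev)), ("num_half_laps", some n),
               ("distance", some (n * dist)), ("switch_idx", none)]]
    else acc
  | i :: is, prev, acc =>
    let n := i + 1 - prev
    let si := start + i + 1
    if (match peel with | some p => decide (si > p) | none => false) then
      acc ++ [[("start_idx", some (start + prev)), ("num_half_laps", some n),
               ("distance", some (n * dist)), ("switch_idx", none)]]
    else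
      pvBLoop start peel dist restLen is (i + 1)
        (acc ++ [[("start_idx", some (start + prev)), ("num_half_laps", some n),
                  ("distance", some (n * dist)), ("switch_idx", some si)]])

def get_chunks_from_schedule_alt (switch_schedule : List Int) (half_lap_completed : Int) (peel_location : Option Int) (half_lap_dist : Int) : List (List (String × Option Int)) :=
  let start := half_lap_completed - 1
  let rest := PySem.List.slice switch_schedule (some start) none
  pvBLoop start peel_location half_lap_dist (rest.length : Int) (pvPosOf 0 rest) 0 []

-- ===== PRECONDITION & SPEC =====
def Spec_get_chunks_from_schedule (switch_schedule : List Int) (half_lap_completed : Int) (peel_location : Option Int) (half_lap_dist : Int) (out : List (List (String × Option Int))) : Prop := out = get_chunks_from_schedule_alt switch_schedule half_lap_completed peel_location half_lap_dist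
instance (switch_schedule : List Int) (half_lap_completed : Int) (peel_location : Option Int) (half_lap_dist : Int) (out : List (List (String × Option Int))) : Decidable (Spec_get_chunks_from_schedule switch_schedule half_lap_completed peel_location half_lap_dist out) := by unfold Spec_get_chunks_from_schedule; infer_instance

-- ===== CLAIM (what is proved, stated in full; the proofs are below) =====
def Claim_equal_get_chunks_from_schedule : Prop := ∀ (switch_schedule : List Int) (half_lap_completed : Int) (peel_location : Option Int) (half_lap_dist : Int), Dom_get_chunks_from_schedule switch_schedule half_lap_completed peel_location half_lap_dist → Spec_get_chunks_from_schedule switch_schedule half_lap_completed peel_location half_lap_dist (get_chunks_from_schedule switch_schedule half_lap_completed peel_location half_lap_dist)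

-- ===== LEMMAS AND PROOFS =====
lemma pv_foldl_add_const (dist : Int) : ∀ (l : List Int) (init : Int),
    l.foldl (fun d _ => d + dist) init = init + (l.length : Int) * dist := by
  intro l
  induction l with
  | nil => intro init; simp
  | cons x xs ih => intro init; simp only [List.foldl, List.length_cons, ih]; push_cast; ring

lemma pv_distance_eq (csi dist : Int) (n : Int) (hn : 0 ≤ n) :
    (PySem.List.pyRange csi (csi + n) 1).foldl (fun d _ => d + dist) 0 = n * dist := by
  rw [pv_foldl_add_const, PySem.List.length_pyRange_one]
  have : ((csi + n - csi).toNat : Int) = n := by omega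
  rw [this]; ring

lemma pv_key (peel : Option Int) (dist : Int) :
    ∀ (vals cur : List Int) (start prev : Int) (acc : List (List (String × Option Int))),
      pvAFin dist (pvALoop peel dist vals acc cur (start + prev)) =
      pvBLoop start peel dist (prev + (cur.length : Int) + (vals.length : Int))
        (pvPosOf (prev + (cur.length : Int)) vals) prev acc := by
  intro vals
  induction vals with
  | nil =>
    intro cur start prev acc
    simp only [pvALoop, pvPosOf, pvBLoop, pvAFin, List.length_nil, Int.natCast_zero, add_zero]
    cases cur with
    | nil => simp
    | cons c cs =>
      simp only [List.isEmpty_cons, Bool.false_eq_true, if_false]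
      have h : prev < prev + (((c :: cs).length : Nat) : Int) := by simp only [List.length_cons]; push_cast; omega
      rw [if_pos h]
      have h2 : prev + ((((c :: cs).length : Nat)) : Int) - prev = (((c :: cs).length : Nat) : Int) := by ring
      rw [h2]
  | cons v vs ih =>
    intro cur start prev acc
    by_cases hv : v = 1
    · subst hv
      have hlen : (((cur ++ [(1:Int)]).length : Nat) : Int) = (cur.length : Int) + 1 := by
        simp
      simp only [pvALoop, pvPosOf, if_true, hlen, pvBLoop]
      have e1 : start + (prev + (cur.length : Int)) + 1 = start + prev + ((cur.length : Int) + 1) := by ring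
      have e2 : prev + (cur.length : Int) + 1 - prev = (cur.length : Int) + 1 := by ring
      rw [e1, e2]
      set c := (match peel with | some p => decide (start + prev + ((cur.length : Int) + 1) > p) | none => false) with hcdef
      cases hcb : c with
      | true =>
        simp only [if_pos]
        simp only [pvAFin]
        have hne : (cur ++ [(1:Int)]).isEmpty = false := by simp
        rw [hne]
        simp only [Bool.false_eq_true, if_false, hlen]
      | false =>
        simp only [Bool.false_eq_true, if_false]
        rw [pv_distance_eq (start + prev) dist ((cur.length : Int) + 1) (by positivity)]
        have := ih [] start (prev + (cur.length : Int) + 1) (acc ++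
          [[("start_idx", some (start + prev)), ("num_half_laps", some ((cur.length : Int) + 1)),
            ("distance", some (((cur.length : Int) + 1) * dist)),
            ("switch_idx", some (start + prev + ((cur.length : Int) + 1)))]])
        simp only [List.length_nil, Int.natCast_zero, add_zero] at this
        simp only [List.length_cons] at this ⊢
        push_cast at this ⊢
        ring_nf at this ⊢
        exact this
    · simp only [pvALoop, if_neg hv, pvPosOf]
      have := ih (cur ++ [v]) start prev acc
      have h1 : prev + (((cur ++ [v]).length : Nat) : Int) = prev + (cur.length : Int) + 1 := by
        simp
        omega
      rw [h1] at this
      have h3 : prev + (cur.length : Int) + 1 + ((vs.length : Nat) : Int)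
          = prev + (cur.length : Int) + (((vs.length : Nat) : Int) + 1) := by ring
      rw [h3] at this
      rw [this]
      simp only [List.length_cons]
      push_cast
      rfl

-- ===== VERDICT (by name: the statement is the Claim_ definition above) =====
theorem get_chunks_from_schedule_spec : Claim_equal_get_chunks_from_schedule := by
  intro ss hlc peel dist _
  unfold Spec_get_chunks_from_schedule get_chunks_from_schedule get_chunks_from_schedule_alt
  have := pv_key peel dist (PySem.List.slice ss (some (hlc - 1)) none) [] (hlc - 1) 0 []
  simp only [List.length_nil, Int.natCast_zero, add_zero, zero_add] at this
  simpa using this
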